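-- pv_equiv track=rewrite | github.com/gabinord/alerte-vehicule | alerte_vehicule.py | motorisation_acceptee
-- ===== SOURCE A (Python) =====
-- MOTS_ESSENCE = ["essence", "ess", "tsi", "vti", "thp", "tfsi", "gti",
--                 "1.0", "1.2", "1.4", "1.6 16v", "sce", "tce"]
--
-- MOTS_DIESEL  = ["diesel", "dci", "hdi", "tdi", "bluehdi", "cdti",
--                 "1.5 dci", "1.6 hdi", "1.9 tdi", "2.0 hdi", "jtd"]
--
-- def motorisation_acceptee(titre, motorisations_voulues):
--     t = titre.lower()
--     if "essence" in motorisations_voulues and "diesel" in motorisations_voulues: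
--         return True
--     if "essence" in motorisations_voulues:
--         if any(m in t for m in MOTS_ESSENCE):
--             return True
--         if not any(m in t for m in MOTS_DIESEL):
--             return True  # Annonce sans info moteur → acceptée
--     if "diesel" in motorisations_voulues:
--         if any(m in t for m in MOTS_DIESEL):
--             return True
--     return False
-- ===== SOURCE B (Python) =====
-- MOTS_ESSENCE = ["essence", "ess", "tsi", "vti", "thp", "tfsi", "gti",
--                 "1.0", "1.2", "1.4", "1.6 16v", "sce", "tce"]
--
-- MOTS_DIESEL  = ["diesel", "dci", "hdi", "tdi", "bluehdi", "cdti",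
--                 "1.5 dci", "1.6 hdi", "1.9 tdi", "2.0 hdi", "jtd"]
--
-- def motorisation_acceptee(titre, motorisations_voulues):
--     # Classify the title once into the set of fuel labels it is compatible with,
--     # then accept iff any wanted label is in that set.
--     t = titre.lower()
--     compatible = set()
--     if any(m in t for m in MOTS_DIESEL):
--         compatible.add("diesel")
--     else:
--         compatible.add("essence")   # no diesel keyword -> acceptable as essence
--     if any(m in t for m in MOTS_ESSENCE):
--         compatible.add("essence")
--     return any(v in compatible for v in motorisations_voulues)
-- ===== Notes on version B (the rewrite author's own statement) =====
-- stated objective: alternative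
-- what changed: B inverts the data flow: it first classifies the title into a set of compatible fuel labels (diesel if a diesel keyword is present, essence if an essence keyword is present or no diesel keyword), then does a single scan of the wanted list for any compatible label, instead of A's nested wanted-membership guards around title scans.
import Mathlib
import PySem

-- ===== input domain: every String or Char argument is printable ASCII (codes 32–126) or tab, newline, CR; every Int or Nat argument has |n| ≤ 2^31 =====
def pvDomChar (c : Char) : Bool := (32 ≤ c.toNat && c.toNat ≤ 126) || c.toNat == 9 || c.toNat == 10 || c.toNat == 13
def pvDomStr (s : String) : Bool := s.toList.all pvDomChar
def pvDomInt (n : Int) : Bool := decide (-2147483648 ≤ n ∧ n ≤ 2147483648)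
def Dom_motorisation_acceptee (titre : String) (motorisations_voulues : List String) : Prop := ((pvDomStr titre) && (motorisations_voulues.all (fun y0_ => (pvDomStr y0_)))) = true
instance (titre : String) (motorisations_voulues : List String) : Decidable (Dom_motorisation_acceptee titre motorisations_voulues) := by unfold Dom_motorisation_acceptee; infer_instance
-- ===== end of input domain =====

-- One honest line: B inverts A's data flow — it classifies the title once into a set of
-- compatible fuel labels and then scans the wanted list for any compatible label (alternative decomposition).

-- ===== PORT A =====
def MOTS_ESSENCE : List String := ["essence", "ess", "tsi", "vti", "thp", "tfsi", "gti",
                "1.0", "1.2", "1.4", "1.6 16v", "sce", "tce"]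

def MOTS_DIESEL : List String := ["diesel", "dci", "hdi", "tdi", "bluehdi", "cdti",
                "1.5 dci", "1.6 hdi", "1.9 tdi", "2.0 hdi", "jtd"]

-- literal transliteration of A: the early-return chain becomes a cascade of ifs in the same order
def motorisation_acceptee (titre : String) (motorisations_voulues : List String) : Bool :=
  let t := PySem.Str.lower titre
  if motorisations_voulues.contains "essence" && motorisations_voulues.contains "diesel" then true
  else if motorisations_voulues.contains "essence" && MOTS_ESSENCE.any (fun m => PySem.Str.isIn m t) then true
  else if motorisations_voulues.contains "essence" && !(MOTS_DIESEL.any (fun m => PySem.Str.isIn m t)) then true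
  else if motorisations_voulues.contains "diesel" && MOTS_DIESEL.any (fun m => PySem.Str.isIn m t) then true
  else false

-- ===== PORT B =====
-- transliteration of Source B: build the 'compatible' set from the title, then scan the wanted list
def motorisation_acceptee_alt (titre : String) (motorisations_voulues : List String) : Bool :=
  let t := PySem.Str.lower titre
  let compatible : PySem.Set String := PySem.Set.empty
  let compatible := if MOTS_DIESEL.any (fun m => PySem.Str.isIn m t)
                    then PySem.Set.add compatible "diesel"
                    else PySem.Set.add compatible "essence"
  let compatible := if MOTS_ESSENCE.any (fun m => PySem.Str.isIn m t)
                    then PySem.Set.add compatible "essence"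
                    else compatible
  motorisations_voulues.any (fun v => PySem.Set.contains compatible v)

-- ===== PRECONDITION & SPEC =====
def Spec_motorisation_acceptee (titre : String) (motorisations_voulues : List String) (out : Bool) : Prop := out = motorisation_acceptee_alt titre motorisations_voulues
instance (titre : String) (motorisations_voulues : List String) (out : Bool) : Decidable (Spec_motorisation_acceptee titre motorisations_voulues out) := by unfold Spec_motorisation_acceptee; infer_instance

-- ===== CLAIM (what is proved, stated in full; the proofs are below) =====
def Claim_equal_motorisation_acceptee : Prop := ∀ (titre : String) (motorisations_voulues : List String), Dom_motorisation_acceptee titre motorisations_voulues → Spec_motorisation_acceptee titre motorisations_voulues (motorisation_acceptee titre motorisations_voulues)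

-- ===== LEMMAS AND PROOFS =====
-- scanning mv for a member of c is scanning c for a member of mv
theorem pv_any_contains_comm (mv c : List String) :
    mv.any (fun v => c.contains v) = c.any (fun x => mv.contains x) := by
  rw [Bool.eq_iff_iff]
  simp only [List.any_eq_true, List.contains_eq_mem, decide_eq_true_eq]
  exact ⟨fun ⟨x, h1, h2⟩ => ⟨x, h2, h1⟩, fun ⟨x, h1, h2⟩ => ⟨x, h2, h1⟩⟩

-- ===== VERDICT (by name: the statement is the Claim_ definition above) =====
theorem motorisation_acceptee_spec : Claim_equal_motorisation_acceptee := by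
  intro titre mv _
  unfold Spec_motorisation_acceptee motorisation_acceptee motorisation_acceptee_alt
  cases hD : MOTS_DIESEL.any (fun m => PySem.Str.isIn m (PySem.Str.lower titre)) <;>
  cases hE : MOTS_ESSENCE.any (fun m => PySem.Str.isIn m (PySem.Str.lower titre)) <;>
    simp only [hD, hE, if_true, Bool.not_true, Bool.not_false, Bool.and_true,
      Bool.and_false, pv_any_contains_comm, PySem.Set.add, PySem.Set.empty,
      PySem.Set.contains, List.any_cons] <;>
    cases hce : mv.contains "essence" <;> cases hcd : mv.contains "diesel" <;>
    simp_all [List.contains_eq_mem]
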